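-- pv_equiv track=rewrite | github.com/AbhishekS31/browserstack-ce-assignment-el-pais-scraper | analysis/text_analyzer.py | find_repeated_words_raw
-- ===== SOURCE A (Python) =====
-- from collections import Counter
--
-- def find_repeated_words_raw(headers):
--     valid_headers = [h for h in headers if h is not None]
--     if not valid_headers:
--         return {}
--
--     combined = " ".join(valid_headers).lower()
--     words = combined.split()
--     word_counts = Counter(words)
--     return {word: count for word, count in word_counts.items() if count > 2}
-- ===== SOURCE B (Python) =====
-- def find_repeated_words_raw(headers):
--     valid = [h for h in headers if h is not None]
--     if not valid:
--         return {}
--     words = " ".join(valid).lower().split()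
--     # sort-then-scan counting: equal words become adjacent, one run-length
--     # pass finds each word's count; no hash-based tallying (Counter) needed
--     sw = sorted(words)
--     big = {}
--     i = 0
--     n = len(sw)
--     while i < n:
--         j = i
--         while j < n and sw[j] == sw[i]:
--             j += 1
--         if j - i > 2:
--             big[sw[i]] = j - i
--         i = j
--     # restore first-appearance order of the result dict
--     return {w: big[w] for w in dict.fromkeys(words) if w in big}
-- ===== Notes on version B (the rewrite author's own statement) =====
-- stated objective: alternative
-- what changed: Counter hash-tallying is replaced by sort-then-scan counting: the word list is sorted, one run-length pass over adjacent equal words collects counts > 2, and a final pass over first occurrences restores the original dict order.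
import Mathlib
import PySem

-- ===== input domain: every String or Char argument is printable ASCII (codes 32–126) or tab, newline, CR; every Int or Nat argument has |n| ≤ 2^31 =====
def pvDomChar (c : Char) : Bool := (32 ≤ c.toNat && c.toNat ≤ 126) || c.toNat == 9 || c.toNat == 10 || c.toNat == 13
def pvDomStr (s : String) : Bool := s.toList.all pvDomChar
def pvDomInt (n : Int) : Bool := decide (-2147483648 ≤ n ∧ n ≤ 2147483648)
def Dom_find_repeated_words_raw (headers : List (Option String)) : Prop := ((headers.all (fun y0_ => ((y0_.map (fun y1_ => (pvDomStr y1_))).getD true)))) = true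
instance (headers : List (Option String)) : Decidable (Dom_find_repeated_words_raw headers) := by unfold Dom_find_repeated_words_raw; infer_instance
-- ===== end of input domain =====

-- B replaces Counter hash-tallying with sort-then-scan run-length counting
-- (same results; alternative algorithm, not claimed faster).

-- ===== PORT A =====
def find_repeated_words_raw (headers : List (Option String)) : List (String × Int) :=
  let valid_headers := headers.filterMap (fun h => h)
  if valid_headers = [] then []
  else
    let combined := PySem.Str.lower (PySem.Str.join " " valid_headers)
    let words := PySem.Str.split₀ combined
    let word_counts := PySem.Dict.counter words
    -- dict comprehension over word_counts.items (insertion order)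
    (word_counts.items.foldl
      (fun d p => if 2 < p.2 then d.insert p.1 p.2 else d) PySem.Dict.empty).items

-- ===== PORT B =====
-- the run-length while loop over the sorted word list, building the dict `big`:
-- i advances run by run; the inner while (counting j - i) is the takeWhile length,
-- `i = j` is the dropWhile
def pvRunDict : List String → PySem.Dict String Int → PySem.Dict String Int
  | [], d => d
  | x :: xs, d =>
    pvRunDict (xs.dropWhile (fun y => y == x))
      (if 2 < 1 + ((xs.takeWhile (fun y => y == x)).length : Int) then
        d.insert x (1 + ((xs.takeWhile (fun y => y == x)).length : Int)) else d)
termination_by l _ => l.length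
decreasing_by
  have := List.length_dropWhile_le (fun y => y == x) xs
  simp only [List.length_cons]; omega

def find_repeated_words_raw_alt (headers : List (Option String)) : List (String × Int) :=
  let valid := headers.filterMap (fun h => h)
  if valid = [] then []
  else
    let words := PySem.Str.split₀ (PySem.Str.lower (PySem.Str.join " " valid))
    let sw := PySem.List.sorted words (fun x => x) false
    let big := pvRunDict sw PySem.Dict.empty
    -- {w: big[w] for w in dict.fromkeys(words) if w in big}
    ((PySem.List.dedup words).foldl
      (fun d w => if big.contains w then d.insert w (big.getD w 0) else d)
      PySem.Dict.empty).items

-- ===== PRECONDITION & SPEC =====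
def Spec_find_repeated_words_raw (headers : List (Option String)) (out : List (String × Int)) : Prop := out = find_repeated_words_raw_alt headers
instance (headers : List (Option String)) (out : List (String × Int)) : Decidable (Spec_find_repeated_words_raw headers out) := by unfold Spec_find_repeated_words_raw; infer_instance

-- ===== CLAIM (what is proved, stated in full; the proofs are below) =====
def Claim_equal_find_repeated_words_raw : Prop := ∀ (headers : List (Option String)), Dom_find_repeated_words_raw headers → Spec_find_repeated_words_raw headers (find_repeated_words_raw headers)

-- ===== LEMMAS AND PROOFS =====

-- in a ≤-sorted list, whatever follows the initial run of x does not contain x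
lemma pv_not_mem_dropWhile (x : String) (xs : List String)
    (hp : (x :: xs).Pairwise (· ≤ ·)) :
    x ∉ xs.dropWhile (fun y => y == x) := by
  intro hmem
  have hne : xs.dropWhile (fun y => y == x) ≠ [] := by
    intro h; rw [h] at hmem; exact List.not_mem_nil hmem
  have hle : ∀ y ∈ xs, x ≤ y := (List.pairwise_cons.1 hp).1
  have hsub : (xs.dropWhile (fun y => y == x)).Sublist xs := List.dropWhile_sublist _
  have hpdd : (xs.dropWhile (fun y => y == x)).Pairwise (· ≤ ·) :=
    (List.pairwise_cons.1 hp).2.sublist hsub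
  obtain ⟨y, ys, hys⟩ := List.exists_cons_of_ne_nil hne
  have hhead : (y == x) = false := by
    have h1 : (xs.dropWhile (fun y => y == x)).head hne = y := by simp [hys]
    rw [← h1]; exact List.head_dropWhile_not _ hne
  simp only [beq_eq_false_iff_ne, ne_eq] at hhead
  have hxley : x ≤ y := hle y (hsub.mem (by rw [hys]; exact List.mem_cons_self))
  rw [hys] at hmem hpdd
  rcases List.mem_cons.1 hmem with h | h
  · exact hhead h.symm
  · have : y ≤ x := (List.pairwise_cons.1 hpdd).1 x h
    exact hhead (le_antisymm this hxley)

-- lookup in the run-length dict of a ≤-sorted list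
lemma pv_get?_runDict (l : List String) (hp : l.Pairwise (· ≤ ·))
    (d : PySem.Dict String Int) (w : String) :
    (pvRunDict l d).get? w =
      if 2 < (l.count w : Int) then some ((l.count w : Int)) else d.get? w := by
  induction l, d using pvRunDict.induct with
  | case1 d => simp [pvRunDict]
  | case2 x xs d ih =>
    have hsplit := List.takeWhile_append_dropWhile (p := fun y => y == x) (l := xs)
    have hpdd : (xs.dropWhile (fun y => y == x)).Pairwise (· ≤ ·) :=
      (List.pairwise_cons.1 hp).2.sublist (List.dropWhile_sublist _)
    have htake : ∀ y ∈ xs.takeWhile (fun y => y == x), y = x := by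
      intro y hy
      have := List.mem_takeWhile_imp hy
      simpa using this
    have hxdd : x ∉ xs.dropWhile (fun y => y == x) := pv_not_mem_dropWhile x xs hp
    have hcx : (x :: xs).count x = 1 + (xs.takeWhile (fun y => y == x)).length := by
      rw [List.count_cons_self]
      conv_lhs => rw [← hsplit]
      rw [List.count_append]
      rw [List.count_eq_length.2 (fun b hb => (htake b hb).symm)]
      rw [List.count_eq_zero.2 hxdd]
      omega
    have ih' := ih hpdd
    simp only [dite_eq_ite] at ih'
    rw [pvRunDict, ih']
    by_cases hw : w = x
    · subst hw
      have hdd0 : (xs.dropWhile (fun y => y == w)).count w = 0 := List.count_eq_zero.2 hxdd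
      have hc0 : ¬ ((2:Int) < (((xs.dropWhile (fun y => y == w)).count w : Nat) : Int)) := by
        rw [hdd0]; norm_num
      rw [if_neg hc0, hcx]
      have hcast : (((1 + (xs.takeWhile (fun y => y == w)).length : Nat)) : Int)
          = 1 + ((xs.takeWhile (fun y => y == w)).length : Int) := by push_cast; ring
      rw [hcast]
      by_cases h2 : (2:Int) < 1 + ((xs.takeWhile (fun y => y == w)).length : Int)
      · rw [if_pos h2, if_pos h2, PySem.Dict.get?_insert_self]
      · rw [if_neg h2, if_neg h2]
    · have hcw : (x :: xs).count w = (xs.dropWhile (fun y => y == x)).count w := by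
        rw [List.count_cons]
        conv_lhs => rw [← hsplit]
        rw [List.count_append]
        rw [List.count_eq_zero.2 (fun hmem => hw ((htake w hmem)))]
        simp [Ne.symm hw]
      rw [hcw]
      by_cases h2 : (2:Int) < ((xs.dropWhile (fun y => y == x)).count w : Int)
      · rw [if_pos h2, if_pos h2]
      · rw [if_neg h2, if_neg h2]
        by_cases h3 : (2:Int) < 1 + ((xs.takeWhile (fun y => y == x)).length : Int)
        · rw [if_pos h3, PySem.Dict.get?_insert_of_ne _ _ hw]
        · rw [if_neg h3]

-- ===== VERDICT (by name: the statement is the Claim_ definition above) =====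
theorem find_repeated_words_raw_spec : Claim_equal_find_repeated_words_raw := by
  intro headers _
  unfold Spec_find_repeated_words_raw find_repeated_words_raw find_repeated_words_raw_alt
  by_cases h : headers.filterMap (fun h => h) = []
  · simp only [h]; decide
  · simp only [if_neg h]
    set ws := PySem.Str.split₀ (PySem.Str.lower (PySem.Str.join " " (headers.filterMap (fun h => h)))) with hws
    set sw := PySem.List.sorted ws (fun x => x) false with hsw
    have hpsw : sw.Pairwise (· ≤ ·) := PySem.List.sorted_pairwise ws (fun x => x)
    have hperm : sw.Perm ws := PySem.List.sorted_perm ws (fun x => x) false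
    have hkey : ∀ w, (pvRunDict sw PySem.Dict.empty).get? w =
        if 2 < ((ws.count w : Int)) then some ((ws.count w : Int)) else none := by
      intro w
      rw [pv_get?_runDict sw hpsw PySem.Dict.empty w, hperm.count_eq, PySem.Dict.get?_empty]
    rw [PySem.Dict.items_counter, List.foldl_map, PySem.List.dedup_eq_ofList]
    apply congrArg PySem.Dict.items
    apply PySem.List.foldl_congr_mem
    intro d w _
    rw [PySem.Dict.contains_eq_isSome_get?, PySem.Dict.getD_eq_get?_getD, hkey w]
    by_cases h2 : (2:Int) < ((ws.count w : Int))
    · rw [if_pos h2, if_pos h2]; rfl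
    · rw [if_neg h2, if_neg h2]; rfl
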